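-- pv_equiv track=rewrite | github.com/Eric345343434/EKG-Data-Analyzer | function.py | hold_power
-- ===== SOURCE A (Python) =====
-- def hold_power(values, times, power_lv):
--     held_time = []
--     start = None
--     end = None
--
--     for value, time in zip(values, times):
--         if value >= power_lv and start is None:
--             start = time
--         if value < power_lv and end is None and start is not None:
--             end = time
--             held_time.append(end - start)
--             start = None
--             end = None
--
--     return max(held_time)
-- ===== SOURCE B (Python) =====
-- from itertools import groupby
--
--
-- def hold_power(values, times, power_lv):
--     # Collapse consecutive samples into groups keyed on being at/above power_lv,
--     # remembering each group's first timestamp; then each above-threshold group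
--     # that has a following group contributes (next group's first time - its own).
--     groups = [(key, next(g)[1]) for key, g in
--               groupby(zip(values, times), key=lambda p: p[0] >= power_lv)]
--     durations = [b[1] - a[1] for a, b in zip(groups, groups[1:]) if a[0]]
--     return max(durations)
-- ===== Notes on version B (the rewrite author's own statement) =====
-- stated objective: alternative
-- what changed: Replaced the flag-based start/end state machine with an itertools.groupby pass that collapses consecutive samples into (is_above, first_time) groups and pairs each above-group with its successor group.
import Mathlib
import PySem

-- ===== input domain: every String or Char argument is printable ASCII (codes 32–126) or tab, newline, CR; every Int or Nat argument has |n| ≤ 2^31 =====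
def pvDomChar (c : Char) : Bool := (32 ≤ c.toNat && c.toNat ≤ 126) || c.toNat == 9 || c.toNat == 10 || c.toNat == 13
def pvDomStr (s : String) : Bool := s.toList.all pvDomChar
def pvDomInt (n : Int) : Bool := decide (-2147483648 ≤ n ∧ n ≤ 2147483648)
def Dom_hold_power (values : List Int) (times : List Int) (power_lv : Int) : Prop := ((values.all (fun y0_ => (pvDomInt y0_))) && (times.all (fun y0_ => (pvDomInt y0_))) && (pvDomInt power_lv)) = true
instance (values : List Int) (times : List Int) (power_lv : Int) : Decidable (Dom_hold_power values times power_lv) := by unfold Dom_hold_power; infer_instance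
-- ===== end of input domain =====

-- B replaces A's flag-based start/end state machine by a group-consecutive-samples pass
-- that pairs each above-threshold group with its successor group (objective: alternative).
-- Equivalence is about the return value; Pre_ excludes the inputs where Python's max([]) raises.

-- ===== PORT A =====
-- one step of A's for-loop over zip(values, times); state = (held_time, start, end)
def holdStep (power_lv : Int) (s : List Int × Option Int × Option Int) (p : Int × Int) :
    List Int × Option Int × Option Int :=
  let held := s.1
  let start := s.2.1
  let e := s.2.2
  let start := if p.1 ≥ power_lv ∧ start = none then some p.2 else start
  if p.1 < power_lv ∧ e = none ∧ start ≠ none then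
    let e : Option Int := some p.2
    (held ++ [e.get! - start.get!], none, none)
  else
    (held, start, e)

def hold_power (values : List Int) (times : List Int) (power_lv : Int) : Int :=
  let r := (values.zip times).foldl (holdStep power_lv) ([], none, none)
  -- Python's max(held_time); it raises ValueError on [], excluded by Pre_hold_power
  (PySem.List.max? r.1 (fun x => x)).getD 0

-- ===== PORT B =====
-- groupby(zip(values, times), key = p.1 ≥ power_lv), keeping each group's key and first time
def grp (power_lv : Int) : List (Int × Int) → List (Bool × Int)
  | [] => []
  | p :: rest =>
    let k := decide (p.1 ≥ power_lv)
    (k, p.2) :: grp power_lv (rest.dropWhile fun q => decide (q.1 ≥ power_lv) == k)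
termination_by l => l.length
decreasing_by
  simpa using Nat.lt_succ_of_le (List.length_dropWhile_le _ _)

def hold_power_alt (values : List Int) (times : List Int) (power_lv : Int) : Int :=
  let gs := grp power_lv (values.zip times)
  let durations := (gs.zip gs.tail).filterMap
    (fun ab => if ab.1.1 then some (ab.2.2 - ab.1.2) else none)
  -- Python's max(durations); it raises ValueError on [], excluded by Pre_hold_power
  (PySem.List.max? durations (fun x => x)).getD 0

-- ===== PRECONDITION & SPEC =====
-- Pre_ excludes exactly the inputs with no completed above-then-below run in zip(values, times);
-- there both A's held_time and B's durations are empty and Python's max([]) raises ValueError.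
def Pre_hold_power (values : List Int) (times : List Int) (power_lv : Int) : Prop :=
  ∃ i < (values.zip times).length, ∃ j < (values.zip times).length,
    i < j ∧ ((values.zip times)[i]!).1 ≥ power_lv ∧ ((values.zip times)[j]!).1 < power_lv

instance (values : List Int) (times : List Int) (power_lv : Int) :
    Decidable (Pre_hold_power values times power_lv) := by unfold Pre_hold_power; infer_instance

def pvWitness_hold_power : List Int × List Int × Int := ([1, 0], [0, 5], 1)

def Spec_hold_power (values : List Int) (times : List Int) (power_lv : Int) (out : Int) : Prop :=
  out = hold_power_alt values times power_lv
instance (values : List Int) (times : List Int) (power_lv : Int) (out : Int) :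
    Decidable (Spec_hold_power values times power_lv out) := by unfold Spec_hold_power; infer_instance

-- ===== CLAIM (what is proved, stated in full; the proofs are below) =====
def Claim_equal_hold_power : Prop := ∀ (values : List Int) (times : List Int) (power_lv : Int), Dom_hold_power values times power_lv → Pre_hold_power values times power_lv → Spec_hold_power values times power_lv (hold_power values times power_lv)

-- ===== LEMMAS AND PROOFS =====

-- common specification: the list of completed run durations, state = optional run start time
def durs (power_lv : Int) : List (Int × Int) → Option Int → List Int
  | [], _ => []
  | p :: rest, none => if p.1 ≥ power_lv then durs power_lv rest (some p.2) else durs power_lv rest none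
  | p :: rest, some s => if p.1 < power_lv then (p.2 - s) :: durs power_lv rest none else durs power_lv rest (some s)

-- the final start state of A's loop
def fin (power_lv : Int) : List (Int × Int) → Option Int → Option Int
  | [], s => s
  | p :: rest, none => if p.1 ≥ power_lv then fin power_lv rest (some p.2) else fin power_lv rest none
  | p :: rest, some s => if p.1 < power_lv then fin power_lv rest none else fin power_lv rest (some s)

theorem foldA_eq (power_lv : Int) (l : List (Int × Int)) :
    ∀ (held : List Int) (start : Option Int),
      l.foldl (holdStep power_lv) (held, start, none) =
        (held ++ durs power_lv l start, fin power_lv l start, none) := by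
  induction l with
  | nil => intro held start; simp [durs, fin]
  | cons p rest ih =>
    intro held start
    cases start with
    | none =>
      by_cases h : p.1 ≥ power_lv
      · have h2 : ¬ p.1 < power_lv := by omega
        simp [holdStep, durs, fin, h, h2, ih]
      · have h2 : p.1 < power_lv := by omega
        simp [holdStep, durs, fin, h, h2, ih]
    | some s =>
      by_cases h : p.1 < power_lv
      · have h2 : ¬ p.1 ≥ power_lv := by omega
        simp [holdStep, durs, fin, h, h2, ih]
      · have h2 : p.1 ≥ power_lv := by omega
        simp [holdStep, durs, fin, h, h2, ih]

def fpairs (gs : List (Bool × Int)) : List Int :=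
  (gs.zip gs.tail).filterMap (fun ab => if ab.1.1 then some (ab.2.2 - ab.1.2) else none)

theorem fpairs_cons_false (t : Int) (gs : List (Bool × Int)) :
    fpairs ((false, t) :: gs) = fpairs gs := by
  cases gs with
  | nil => simp [fpairs]
  | cons b tl => simp [fpairs]

theorem fpairs_cons_cons_true (t : Int) (b : Bool × Int) (gs : List (Bool × Int)) :
    fpairs ((true, t) :: b :: gs) = (b.2 - t) :: fpairs (b :: gs) := by
  simp [fpairs]

-- dropping below-threshold samples while no run is open does not change the durations
theorem durs_dropWhile_false (power_lv : Int) (l : List (Int × Int)) :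
    durs power_lv (l.dropWhile fun q => decide (q.1 ≥ power_lv) == false) none =
      durs power_lv l none := by
  induction l with
  | nil => rfl
  | cons q rest ih =>
    by_cases h : q.1 ≥ power_lv
    · rw [List.dropWhile_cons_of_neg (by simp; omega)]
    · have h2 : q.1 < power_lv := by omega
      rw [List.dropWhile_cons_of_pos (by simp; omega), ih]
      simp [durs, h]

-- dropping above-threshold samples while a run is open does not change the durations
theorem durs_dropWhile_true (power_lv s : Int) (l : List (Int × Int)) :
    durs power_lv (l.dropWhile fun q => decide (q.1 ≥ power_lv) == true) (some s) =
      durs power_lv l (some s) := by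
  induction l with
  | nil => rfl
  | cons q rest ih =>
    by_cases h : q.1 ≥ power_lv
    · have h2 : ¬ q.1 < power_lv := by omega
      rw [List.dropWhile_cons_of_pos (by simp; omega), ih]
      simp [durs, h2]
    · rw [List.dropWhile_cons_of_neg (by simp; omega)]

theorem grp_eq_durs_aux (power_lv : Int) :
    ∀ (n : Nat) (l : List (Int × Int)), l.length ≤ n →
      fpairs (grp power_lv l) = durs power_lv l none := by
  intro n
  induction n with
  | zero =>
    intro l hl
    have : l = [] := List.eq_nil_of_length_eq_zero (Nat.le_zero.mp hl)
    subst this; simp [grp, fpairs, durs]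
  | succ n ih =>
    intro l hl
    cases l with
    | nil => simp [grp, fpairs, durs]
    | cons p rest =>
      by_cases h : p.1 ≥ power_lv
      · -- above-threshold group
        have hg : grp power_lv (p :: rest) =
            (true, p.2) :: grp power_lv (rest.dropWhile fun q => decide (q.1 ≥ power_lv) == true) := by
          simp [grp, h]
        set rest' := rest.dropWhile fun q => decide (q.1 ≥ power_lv) == true with hrest'
        have hlen : rest'.length ≤ n := by
          have h3 := List.length_dropWhile_le (fun q => decide (q.1 ≥ power_lv) == true) rest
          rw [← hrest'] at h3
          simp at hl; omega
        have hdurs : durs power_lv (p :: rest) none = durs power_lv rest' (some p.2) := by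
          rw [hrest', durs_dropWhile_true]
          simp [durs, h]
        cases hre : rest' with
        | nil =>
          rw [hg, hre, hdurs, hre]
          simp [grp, fpairs, durs]
        | cons q r =>
          have hq := List.head?_dropWhile_not (fun q => decide (q.1 ≥ power_lv) == true) rest
          rw [← hrest', hre] at hq
          have hqlt : q.1 < power_lv := by
            simp [List.head?] at hq; omega
          have hgr : grp power_lv rest' =
              (false, q.2) :: grp power_lv (r.dropWhile fun x => decide (x.1 ≥ power_lv) == false) := by
            rw [hre]; simp [grp, show ¬ q.1 ≥ power_lv by omega]
          rw [hg, hgr, fpairs_cons_cons_true, ← hgr, ih rest' hlen, hdurs, hre]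
          simp [durs, hqlt]
      · -- below-threshold group
        have h2 : p.1 < power_lv := by omega
        have hg : grp power_lv (p :: rest) =
            (false, p.2) :: grp power_lv (rest.dropWhile fun q => decide (q.1 ≥ power_lv) == false) := by
          simp [grp, h]
        set rest' := rest.dropWhile fun q => decide (q.1 ≥ power_lv) == false with hrest'
        have hlen : rest'.length ≤ n := by
          have h3 := List.length_dropWhile_le (fun q => decide (q.1 ≥ power_lv) == false) rest
          rw [← hrest'] at h3
          simp at hl; omega
        rw [hg, fpairs_cons_false, ih rest' hlen, hrest', durs_dropWhile_false]
        simp [durs, h]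

theorem grp_eq_durs (power_lv : Int) (l : List (Int × Int)) :
    fpairs (grp power_lv l) = durs power_lv l none :=
  grp_eq_durs_aux power_lv l.length l (le_refl _)

-- ===== VERDICT (by name: the statement is the Claim_ definition above) =====
theorem hold_power_spec : Claim_equal_hold_power := by
  intro values times power_lv _ _
  unfold Spec_hold_power hold_power hold_power_alt
  rw [foldA_eq]
  have := grp_eq_durs power_lv (values.zip times)
  simp [fpairs] at this
  simp [this]
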